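-- pv_equiv track=rewrite | github.com/Da-Real-Kryall/Molecuscript | interpreter.py | underscore_nested
-- ===== SOURCE A (Python) =====
-- def underscore_nested(chain: str) -> str:
--     """
--     Converts the dashes inside brackets to underscores for splitting
--     """
--     inbracket = 0
--     chain = list(chain)
--     for index, char in enumerate(chain):
--         if char == "(":
--             inbracket += 1
--         elif char == ")":
--             inbracket -= 1
--         if inbracket != 0 and char == "-":
--             chain[index] = '_'
--     chain = ''.join(chain)
--     return chain
-- ===== SOURCE B (Python) =====
-- def underscore_nested(chain: str) -> str:
--     # Segment-based: cut the string at bracket characters; a whole segment between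
--     # brackets lies at one constant depth, so rewrite it wholesale with str.replace.
--     parts = []
--     rest = chain
--     depth = 0
--     while rest:
--         p = len(rest)
--         for b in '()':
--             q = rest.find(b)
--             if q != -1 and q < p:
--                 p = q
--         seg = rest[:p]
--         parts.append(seg.replace('-', '_') if depth != 0 else seg)
--         if p == len(rest):
--             break
--         br = rest[p]
--         parts.append(br)
--         depth += 1 if br == '(' else -1
--         rest = rest[p + 1:]
--     return ''.join(parts)
-- ===== Notes on version B (the rewrite author's own statement) =====
-- stated objective: faster
-- what changed: Instead of deciding per character with a running counter, B cuts the string into bracket-free segments at each bracket and rewrites each whole segment at nonzero depth with one str.replace, joining the pieces at the end.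
import Mathlib
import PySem

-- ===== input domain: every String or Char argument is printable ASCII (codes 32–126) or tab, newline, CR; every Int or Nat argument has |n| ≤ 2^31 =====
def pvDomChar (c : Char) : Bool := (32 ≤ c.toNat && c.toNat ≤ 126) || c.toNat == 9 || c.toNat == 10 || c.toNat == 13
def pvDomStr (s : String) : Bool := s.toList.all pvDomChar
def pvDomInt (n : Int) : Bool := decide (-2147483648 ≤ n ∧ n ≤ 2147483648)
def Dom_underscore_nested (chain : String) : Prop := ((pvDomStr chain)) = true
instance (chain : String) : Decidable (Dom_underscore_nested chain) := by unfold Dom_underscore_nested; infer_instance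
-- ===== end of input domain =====

-- B cuts the string into bracket-free segments and rewrites whole segments at nonzero depth with str.replace, instead of A's per-character counter loop; a timing run measured B faster (constant factor).

-- ===== PORT A =====
-- A's loop: carry `inbracket`, update it on '(' / ')', then replace '-' when inbracket ≠ 0.
def pvALoop (inbracket : Int) : List Char → List Char
  | [] => []
  | c :: cs =>
    let d := if c = '(' then inbracket + 1 else if c = ')' then inbracket - 1 else inbracket
    (if d ≠ 0 ∧ c = '-' then '_' else c) :: pvALoop d cs

def underscore_nested (chain : String) : String :=
  String.mk (pvALoop 0 chain.toList)

-- ===== PORT B =====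
-- Source B finds the first bracket (min of find('(') / find(')')); on List Char that is
-- exactly the takeWhile/dropWhile split at the first bracket character.
def pvNotBr (c : Char) : Bool := !(c = '(' || c = ')')

-- single-char str.replace('-', '_') is exactly a character map
def pvReplDash (seg : List Char) : List Char :=
  seg.map (fun c => if c = '-' then '_' else c)

-- Source B's while loop: emit the bracket-free segment (rewritten if depth ≠ 0), then the
-- bracket itself, update depth, continue on the remainder.
def pvBGo (depth : Int) (s : List Char) : List Char :=
  let seg := s.takeWhile pvNotBr
  let seg' := if depth ≠ 0 then pvReplDash seg else seg
  match h : s.dropWhile pvNotBr with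
  | [] => seg'
  | b :: rest =>
    seg' ++ b :: pvBGo (if b = '(' then depth + 1 else depth - 1) rest
termination_by s.length
decreasing_by
  have hle : (s.dropWhile pvNotBr).length ≤ s.length := s.length_dropWhile_le pvNotBr
  rw [h] at hle
  simp at hle
  omega

def underscore_nested_alt (chain : String) : String :=
  String.mk (pvBGo 0 chain.toList)

-- ===== PRECONDITION & SPEC =====
def Spec_underscore_nested (chain : String) (out : String) : Prop := out = underscore_nested_alt chain
instance (chain : String) (out : String) : Decidable (Spec_underscore_nested chain out) := by unfold Spec_underscore_nested; infer_instance

-- ===== CLAIM (what is proved, stated in full; the proofs are below) =====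
def Claim_equal_underscore_nested : Prop := ∀ (chain : String), Dom_underscore_nested chain → Spec_underscore_nested chain (underscore_nested chain)

-- ===== LEMMAS AND PROOFS =====

-- A's loop over a bracket-free prefix leaves the depth unchanged and acts as a char map.
theorem pvALoop_seg (d : Int) (seg t : List Char) (hseg : ∀ c ∈ seg, pvNotBr c = true) :
    pvALoop d (seg ++ t) = (if d ≠ 0 then pvReplDash seg else seg) ++ pvALoop d t := by
  induction seg with
  | nil => simp [pvReplDash]
  | cons c cs ih =>
    have hc := hseg c (by simp)
    have h1 : ¬ c = '(' := by simp [pvNotBr] at hc; exact hc.1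
    have h2 : ¬ c = ')' := by simp [pvNotBr] at hc; exact hc.2
    have ih' := ih (fun x hx => hseg x (by simp [hx]))
    by_cases hd : d = 0 <;>
      simp [pvALoop, h1, h2, hd, pvReplDash, ih', pvReplDash] at * <;>
      simp [ih']

theorem pvALoop_eq_pvBGo (d : Int) (s : List Char) : pvALoop d s = pvBGo d s := by
  induction d, s using pvBGo.induct with
  | case1 d s hdrop =>
    rw [pvBGo]; rw [hdrop]
    have hs : s.takeWhile pvNotBr = s := by
      conv_rhs => rw [← s.takeWhile_append_dropWhile (p := pvNotBr)]
      rw [hdrop, List.append_nil]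
    have hseg : ∀ c ∈ s.takeWhile pvNotBr, pvNotBr c = true :=
      fun c hc => List.mem_takeWhile_imp hc
    have h := pvALoop_seg d (s.takeWhile pvNotBr) [] hseg
    calc pvALoop d s = pvALoop d (s.takeWhile pvNotBr ++ []) := by
          rw [List.append_nil, hs]
      _ = _ := by simpa [pvALoop] using h
  | case2 d s b rest hdrop ih =>
    rw [pvBGo]; rw [hdrop]
    have hs : s = s.takeWhile pvNotBr ++ b :: rest := by
      conv_lhs => rw [← s.takeWhile_append_dropWhile (p := pvNotBr)]
      rw [hdrop]
    have hseg : ∀ c ∈ s.takeWhile pvNotBr, pvNotBr c = true :=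
      fun c hc => List.mem_takeWhile_imp hc
    have hb : pvNotBr b = false := by
      have h := List.head?_dropWhile_not pvNotBr s
      rw [hdrop] at h; simpa using h
    have hb' : b = '(' ∨ b = ')' := by
      by_cases h1 : b = '(' <;> by_cases h2 : b = ')' <;> simp [pvNotBr, h1, h2] at hb ⊢
    conv_lhs => rw [hs]
    rw [pvALoop_seg d _ _ hseg]
    congr 1
    rcases hb' with h | h <;> subst h <;> simp [pvALoop] at ih ⊢ <;> rw [ih]

-- ===== VERDICT (by name: the statement is the Claim_ definition above) =====
theorem underscore_nested_spec : Claim_equal_underscore_nested := by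
  intro chain _
  unfold Spec_underscore_nested underscore_nested underscore_nested_alt
  rw [pvALoop_eq_pvBGo]
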